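-- pv_equiv track=rewrite | github.com/The-King-12345/Advent-of-Code | 2024/day12/main.py | find_perm
-- ===== SOURCE A (Python) =====
-- def find_perm(region: set[tuple[int,int]]) -> int:
--     perm = 0
--
--     for row,col in region:
--         if (row-1,col) not in region:
--             perm += 1
--         if (row+1,col) not in region:
--             perm += 1
--         if (row,col+1) not in region:
--             perm += 1
--         if (row,col-1) not in region:
--             perm += 1
--
--     return perm
-- ===== SOURCE B (Python) =====
-- def find_perm(region: set[tuple[int, int]]) -> int:
--     # Count boundary edges: each unit edge is shared by exactly two cells,
--     # so interior edges get multiplicity 2 and boundary edges multiplicity 1.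
--     cnt = {}
--     for row, col in region:
--         for e in (('h', row, col), ('h', row + 1, col),
--                   ('v', row, col), ('v', row, col + 1)):
--             cnt[e] = cnt.get(e, 0) + 1
--     return sum(1 for v in cnt.values() if v == 1)
-- ===== Notes on version B (the rewrite author's own statement) =====
-- stated objective: alternative
-- what changed: Replaces the per-cell four-neighbor membership test with a one-pass multiplicity count of canonical unit-edge keys in a dict; the perimeter is the number of edges occurring exactly once.
import Mathlib
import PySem

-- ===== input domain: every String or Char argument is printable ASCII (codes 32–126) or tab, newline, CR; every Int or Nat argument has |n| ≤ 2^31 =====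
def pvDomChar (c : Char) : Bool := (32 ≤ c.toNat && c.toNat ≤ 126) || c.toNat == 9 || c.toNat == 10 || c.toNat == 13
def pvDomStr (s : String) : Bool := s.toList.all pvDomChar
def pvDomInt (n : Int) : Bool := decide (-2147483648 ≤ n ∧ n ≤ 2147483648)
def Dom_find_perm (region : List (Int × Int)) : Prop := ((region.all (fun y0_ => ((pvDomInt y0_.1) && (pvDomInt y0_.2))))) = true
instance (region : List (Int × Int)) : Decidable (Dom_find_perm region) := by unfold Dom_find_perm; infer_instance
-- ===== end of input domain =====

-- B counts each canonical unit-edge key once per incident cell in a dict of multiplicities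
-- and returns the number of edges with multiplicity 1, instead of A's per-cell
-- four-neighbor membership tests; objective: alternative (same asymptotic cost).


-- ===== PORT A =====
def find_perm (region : List (Int × Int)) : Int :=
  region.foldl (fun perm p =>
    (((perm + (if (p.1 - 1, p.2) ∈ region then 0 else 1))
          + (if (p.1 + 1, p.2) ∈ region then 0 else 1))
          + (if (p.1, p.2 + 1) ∈ region then 0 else 1))
          + (if (p.1, p.2 - 1) ∈ region then 0 else 1)) 0

-- ===== PORT B =====
-- the four canonical unit-edge keys of a cell (the tuple literal of Source B's inner loop)
def pvEdges (p : Int × Int) : List (String × Int × Int) :=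
  [("h", p.1, p.2), ("h", p.1 + 1, p.2), ("v", p.1, p.2), ("v", p.1, p.2 + 1)]

def find_perm_alt (region : List (Int × Int)) : Int :=
  let cnt := region.foldl
    (fun d p => (pvEdges p).foldl (fun d e => d.insert e (d.getD e 0 + 1)) d)
    (PySem.Dict.empty : PySem.Dict (String × Int × Int) Int)
  ((cnt.values.filter (fun v => v == (1 : Int))).length : Int)

-- ===== PRECONDITION & SPEC =====
-- region is a Python set[tuple[int,int]], hence a list of DISTINCT cells (type convention);
-- Pre_ excludes lists with duplicate cells (not set values), on which A counts each copy separately while B cancels shared edges.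
def Pre_find_perm (region : List (Int × Int)) : Prop := region.Nodup
instance (region : List (Int × Int)) : Decidable (Pre_find_perm region) := by unfold Pre_find_perm; infer_instance
def pvWitness_find_perm : (List (Int × Int)) := [(0, 0), (0, 1)]
def Spec_find_perm (region : List (Int × Int)) (out : Int) : Prop := out = find_perm_alt region
instance (region : List (Int × Int)) (out : Int) : Decidable (Spec_find_perm region out) := by unfold Spec_find_perm; infer_instance

-- ===== CLAIM (what is proved, stated in full; the proofs are below) =====
def Claim_equal_find_perm : Prop := ∀ (region : List (Int × Int)), Dom_find_perm region → Pre_find_perm region → Spec_find_perm region (find_perm region)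

-- ===== LEMMAS AND PROOFS =====

-- a nested loop over f x is a loop over the flattened list
lemma pv_foldl_flatMap_eq {α β σ : Type} (g : σ → β → σ) (f : α → List β) (l : List α) (d : σ) :
    l.foldl (fun d x => (f x).foldl g d) d = (l.flatMap f).foldl g d := by
  induction l generalizing d with
  | nil => rfl
  | cons a t ih => simp [List.flatMap_cons, List.foldl_append, ih]

lemma pv_castBeq (n : Nat) : (((n : Int) == (1 : Int))) = (n == 1) := by
  by_cases h : n = 1
  · simp [h]
  · have h' : (n : Int) ≠ 1 := by exact_mod_cast h
    simp [h, h']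

-- the four edges of a cell are pairwise distinct
lemma pv_nodup_pvEdges (p : Int × Int) : (pvEdges p).Nodup := by
  simp [pvEdges, Prod.ext_iff]

lemma pv_count_pvEdges (p : Int × Int) (e : String × Int × Int) :
    (pvEdges p).count e = if e ∈ pvEdges p then 1 else 0 := by
  by_cases h : e ∈ pvEdges p
  · simp [h, List.count_eq_one_of_mem (pv_nodup_pvEdges p) h]
  · simp [h, List.count_eq_zero_of_not_mem h]

lemma pv_count_flatMap (region : List (Int × Int)) (e : String × Int × Int) :
    (region.flatMap pvEdges).count e = region.countP (fun q => e ∈ pvEdges q) := by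
  induction region with
  | nil => rfl
  | cons p t ih =>
    rw [List.flatMap_cons, List.count_append, ih, List.countP_cons, pv_count_pvEdges]
    by_cases h : e ∈ pvEdges p <;> simp [h]
    omega

lemma pv_countP_pair {α : Type} [BEq α] [LawfulBEq α] (l : List α) {p n : α} (h : p ≠ n) :
    l.countP (fun q => q == p || q == n) = l.count p + l.count n := by
  induction l with
  | nil => rfl
  | cons a t ih =>
    rw [List.countP_cons, List.count_cons, List.count_cons, ih]
    by_cases hp : a == p <;> by_cases hn : a == n <;> simp_all <;> omega

-- incidence: which cells q have e among their edges, for each of p's four edges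
lemma pv_mem_top (p q : Int × Int) :
    ((("h", p.1, p.2) : String × Int × Int) ∈ pvEdges q) ↔ (q = p ∨ q = (p.1 - 1, p.2)) := by
  simp [pvEdges, Prod.ext_iff]
  omega

lemma pv_mem_bottom (p q : Int × Int) :
    ((("h", p.1 + 1, p.2) : String × Int × Int) ∈ pvEdges q) ↔ (q = p ∨ q = (p.1 + 1, p.2)) := by
  simp [pvEdges, Prod.ext_iff]
  omega

lemma pv_mem_left (p q : Int × Int) :
    ((("v", p.1, p.2) : String × Int × Int) ∈ pvEdges q) ↔ (q = p ∨ q = (p.1, p.2 - 1)) := by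
  simp [pvEdges, Prod.ext_iff]
  omega

lemma pv_mem_right (p q : Int × Int) :
    ((("v", p.1, p.2 + 1) : String × Int × Int) ∈ pvEdges q) ↔ (q = p ∨ q = (p.1, p.2 + 1)) := by
  simp [pvEdges, Prod.ext_iff]
  omega

-- count of an edge incident to p and to the neighbor n
lemma pv_count_edge {region : List (Int × Int)} (hnd : region.Nodup) {p : Int × Int}
    (hp : p ∈ region) (e : String × Int × Int) (n : Int × Int) (hpn : p ≠ n)
    (hmem : ∀ q, (e ∈ pvEdges q) ↔ (q = p ∨ q = n)) :
    (region.flatMap pvEdges).count e = 1 + (if n ∈ region then 1 else 0) := by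
  rw [pv_count_flatMap]
  rw [List.countP_congr (q := fun q => q == p || q == n) (by intro x _; simp [hmem x])]
  rw [pv_countP_pair _ hpn, List.count_eq_one_of_mem hnd hp]
  by_cases hn : n ∈ region
  · simp [hn, List.count_eq_one_of_mem hnd hn]
  · simp [hn, List.count_eq_zero_of_not_mem hn]

-- per-cell: B's edge-multiplicity test agrees with A's four neighbor tests
lemma pv_cell (region : List (Int × Int)) (hnd : region.Nodup) (p : Int × Int) (hp : p ∈ region) :
    ((((0 : Int) + (if (p.1 - 1, p.2) ∈ region then 0 else 1))
          + (if (p.1 + 1, p.2) ∈ region then 0 else 1))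
          + (if (p.1, p.2 + 1) ∈ region then 0 else 1))
          + (if (p.1, p.2 - 1) ∈ region then 0 else 1)
      = (((pvEdges p).countP (fun e => (region.flatMap pvEdges).count e == 1) : Nat) : Int) := by
  have h1 := pv_count_edge hnd hp ("h", p.1, p.2) (p.1 - 1, p.2)
      (by intro hq; rw [Prod.ext_iff] at hq; omega) (pv_mem_top p)
  have h2 := pv_count_edge hnd hp ("h", p.1 + 1, p.2) (p.1 + 1, p.2)
      (by intro hq; rw [Prod.ext_iff] at hq; omega) (pv_mem_bottom p)
  have h3 := pv_count_edge hnd hp ("v", p.1, p.2) (p.1, p.2 - 1)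
      (by intro hq; rw [Prod.ext_iff] at hq; omega) (pv_mem_left p)
  have h4 := pv_count_edge hnd hp ("v", p.1, p.2 + 1) (p.1, p.2 + 1)
      (by intro hq; rw [Prod.ext_iff] at hq; omega) (pv_mem_right p)
  simp only [pvEdges, List.countP_cons, List.countP_nil, h1, h2, h3, h4]
  split_ifs <;> simp_all

-- A's sequential += loop is the sum of per-cell contributions
lemma pv_foldl_add4 {α : Type} (f1 f2 f3 f4 : α → Int) (l : List α) (i : Int) :
    l.foldl (fun a x => (((a + f1 x) + f2 x) + f3 x) + f4 x) i
      = i + (l.map (fun x => (((0 + f1 x) + f2 x) + f3 x) + f4 x)).sum := by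
  induction l generalizing i with
  | nil => simp
  | cons a t ih => simp [ih]; ring

-- B computes the number of edge keys of multiplicity 1
lemma pv_alt_eq (region : List (Int × Int)) :
    find_perm_alt region
      = (((region.flatMap pvEdges).countP
            (fun e => (region.flatMap pvEdges).count e == 1) : Nat) : Int) := by
  set L := region.flatMap pvEdges with hL
  show ((((region.foldl
      (fun d p => (pvEdges p).foldl (fun d e => d.insert e (d.getD e 0 + 1)) d)
      (PySem.Dict.empty : PySem.Dict (String × Int × Int) Int)).values.filter
        (fun v => v == (1 : Int))).length : Nat) : Int) = _
  rw [pv_foldl_flatMap_eq, ← hL, PySem.Dict.foldl_insert_getD_add_one_eq_counter]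
  have hval : (PySem.Dict.counter L).values
      = (PySem.Set.ofList L).map (fun k => ((L.count k : Int))) := by
    simp [PySem.Dict.values, PySem.Dict.items_counter]
  rw [hval, List.filter_map, List.length_map]
  have hperm : List.Perm ((PySem.Set.ofList L).filter (fun k => L.count k == 1))
      (L.filter (fun k => L.count k == 1)) := by
    rw [List.perm_iff_count]
    intro x
    by_cases hx : L.count x == 1
    · rw [List.count_filter (p := fun k => L.count k == 1) hx,
        List.count_filter (p := fun k => L.count k == 1) hx]
      have hxL : x ∈ L := by
        rw [← List.count_pos_iff]
        have := beq_iff_eq.mp hx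
        omega
      have hxS : x ∈ PySem.Set.ofList L := (PySem.Set.mem_ofList ..).mpr hxL
      rw [List.count_eq_one_of_mem (PySem.Set.nodup_ofList L) hxS, beq_iff_eq.mp hx]
    · have hnot : ∀ (m : List (String × Int × Int)),
          x ∉ m.filter (fun k => L.count k == 1) := by
        intro m hm
        exact hx ((List.mem_filter.mp hm).2)
      rw [List.count_eq_zero_of_not_mem (hnot _), List.count_eq_zero_of_not_mem (hnot _)]
  have hcond : ((fun v => v == (1 : Int)) ∘ fun k : String × Int × Int => ((L.count k : Int)))
      = fun k : String × Int × Int => L.count k == 1 := by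
    funext k
    exact pv_castBeq (L.count k)
  rw [hcond, hperm.length_eq, List.countP_eq_length_filter]

-- ===== VERDICT (by name: the statement is the Claim_ definition above) =====
theorem find_perm_spec : Claim_equal_find_perm := by
  intro region _ hnd
  unfold Spec_find_perm find_perm
  rw [pv_alt_eq, List.countP_flatMap, pv_foldl_add4, zero_add, Nat.cast_list_sum,
    List.map_map]
  exact congrArg List.sum (List.map_congr_left (fun p hp => pv_cell region hnd p hp))
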